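-- pv_equiv track=rewrite | github.com/leejaeyoung-cpu/ADDS_EN | src/utils/abnormal_cell_profiler.py | _categorize_abnormalities
-- ===== SOURCE A (Python) =====
-- from typing import Dict, List
--
-- def _categorize_abnormalities(profiles: List[Dict]) -> Dict:
--     """Categorize abnormalities by type"""
--     categories = {
--         'Irregular Shape': 0,
--         'Elongated': 0,
--         'Extremely Large': 0,
--         'Extremely Small': 0
--     }
--
--     for profile in profiles:
--         reasons = ' '.join(profile['abnormality_reasons'])
--
--         if '원형도' in reasons:
--             categories['Irregular Shape'] += 1
--         if '종횡비' in reasons or '길쭉' in reasons: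
--             categories['Elongated'] += 1
--         if '크고' in reasons or 'large' in reasons.lower():
--             categories['Extremely Large'] += 1
--         if '작고' in reasons or 'small' in reasons.lower():
--             categories['Extremely Small'] += 1
--
--     return categories
-- ===== SOURCE B (Python) =====
-- from typing import Dict, List
--
--
-- def _categorize_abnormalities(profiles: List[Dict]) -> Dict:
--     """Categorize abnormalities: one independent counting pass per category."""
--     def joined(profile):
--         return ' '.join(profile['abnormality_reasons'])
--
--     return {
--         'Irregular Shape': sum(1 for p in profiles if '원형도' in joined(p)),
--         'Elongated': sum(1 for p in profiles
--                          if '종횡비' in joined(p) or '길쭉' in joined(p)),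
--         'Extremely Large': sum(1 for p in profiles
--                                if '크고' in joined(p) or 'large' in joined(p).lower()),
--         'Extremely Small': sum(1 for p in profiles
--                                if '작고' in joined(p) or 'small' in joined(p).lower()),
--     }
-- ===== Notes on version B (the rewrite author's own statement) =====
-- stated objective: alternative
-- what changed: Replaces the single fold that mutates one shared 4-key counter dict with four independent counting passes, one per category, each a sum over the profiles; the dict is built once from the four counts.
-- outside the precondition, e.g. on _categorize_abnormalities([{}]): A raises KeyError, B raises KeyError
import Mathlib
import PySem

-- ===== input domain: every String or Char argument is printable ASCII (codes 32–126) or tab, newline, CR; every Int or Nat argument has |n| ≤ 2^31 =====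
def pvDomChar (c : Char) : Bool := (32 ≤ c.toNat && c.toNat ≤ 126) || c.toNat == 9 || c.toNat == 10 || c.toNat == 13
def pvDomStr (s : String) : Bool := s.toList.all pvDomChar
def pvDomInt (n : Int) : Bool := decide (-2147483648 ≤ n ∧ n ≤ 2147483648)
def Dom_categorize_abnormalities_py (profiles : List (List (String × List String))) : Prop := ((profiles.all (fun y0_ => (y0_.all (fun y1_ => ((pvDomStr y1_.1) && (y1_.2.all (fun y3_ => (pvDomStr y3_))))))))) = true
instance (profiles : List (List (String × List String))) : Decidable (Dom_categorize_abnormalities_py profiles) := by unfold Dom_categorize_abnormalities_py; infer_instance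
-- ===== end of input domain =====

-- B replaces A's single fold over a mutated 4-key counter dict by four independent
-- counting passes (one per category); same cost, different decomposition ("alternative").

-- ===== PORT A =====
-- A's loop body: reasons = ' '.join(profile['abnormality_reasons']); four if-updates of the dict.
-- Under Pre_ the key is present, so `.getD []` never supplies its default.
def stepA (d : PySem.Dict String Int) (profile : List (String × List String)) : PySem.Dict String Int :=
  let reasons := PySem.Str.join " " ((PySem.Dict.get? (PySem.Dict.mk profile) "abnormality_reasons").getD [])
  let d := if PySem.Str.isIn "원형도" reasons then d.modify "Irregular Shape" 0 (· + 1) else d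
  let d := if PySem.Str.isIn "종횡비" reasons || PySem.Str.isIn "길쭉" reasons then d.modify "Elongated" 0 (· + 1) else d
  let d := if PySem.Str.isIn "크고" reasons || PySem.Str.isIn "large" (PySem.Str.lower reasons) then d.modify "Extremely Large" 0 (· + 1) else d
  if PySem.Str.isIn "작고" reasons || PySem.Str.isIn "small" (PySem.Str.lower reasons) then d.modify "Extremely Small" 0 (· + 1) else d

def categorize_abnormalities_py (profiles : List (List (String × List String))) : List (String × Int) :=
  let categories : PySem.Dict String Int :=
    PySem.Dict.ofList [("Irregular Shape", 0), ("Elongated", 0), ("Extremely Large", 0), ("Extremely Small", 0)]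
  (profiles.foldl stepA categories).items

-- ===== PORT B =====
-- B's helper: joined(profile) = ' '.join(profile['abnormality_reasons'])
def joinedR (profile : List (String × List String)) : String :=
  PySem.Str.join " " ((PySem.Dict.get? (PySem.Dict.mk profile) "abnormality_reasons").getD [])

def categorize_abnormalities_py_alt (profiles : List (List (String × List String))) : List (String × Int) :=
  [("Irregular Shape", (profiles.countP (fun p => PySem.Str.isIn "원형도" (joinedR p)) : Int)),
   ("Elongated", (profiles.countP (fun p => PySem.Str.isIn "종횡비" (joinedR p) || PySem.Str.isIn "길쭉" (joinedR p)) : Int)),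
   ("Extremely Large", (profiles.countP (fun p => PySem.Str.isIn "크고" (joinedR p) || PySem.Str.isIn "large" (PySem.Str.lower (joinedR p))) : Int)),
   ("Extremely Small", (profiles.countP (fun p => PySem.Str.isIn "작고" (joinedR p) || PySem.Str.isIn "small" (PySem.Str.lower (joinedR p))) : Int))]

-- ===== PRECONDITION & SPEC =====
-- Pre_ excludes profiles missing the key 'abnormality_reasons', on which A raises KeyError.
def Pre_categorize_abnormalities_py (profiles : List (List (String × List String))) : Prop :=
  ∀ p ∈ profiles, "abnormality_reasons" ∈ p.map Prod.fst
instance (profiles : List (List (String × List String))) : Decidable (Pre_categorize_abnormalities_py profiles) := by unfold Pre_categorize_abnormalities_py; infer_instance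

def pvWitness_categorize_abnormalities_py : (List (List (String × List String))) :=
  [[("abnormality_reasons", ["very large cell"])], [("abnormality_reasons", [])]]

def Spec_categorize_abnormalities_py (profiles : List (List (String × List String))) (out : List (String × Int)) : Prop := out = categorize_abnormalities_py_alt profiles
instance (profiles : List (List (String × List String))) (out : List (String × Int)) : Decidable (Spec_categorize_abnormalities_py profiles out) := by unfold Spec_categorize_abnormalities_py; infer_instance

-- ===== CLAIM (what is proved, stated in full; the proofs are below) =====
def Claim_equal_categorize_abnormalities_py : Prop := ∀ (profiles : List (List (String × List String))), Dom_categorize_abnormalities_py profiles → Pre_categorize_abnormalities_py profiles → Spec_categorize_abnormalities_py profiles (categorize_abnormalities_py profiles)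

-- ===== LEMMAS AND PROOFS =====

-- One step of A's loop on the 4-key counter dict bumps exactly the matching counters.
theorem stepA_mk (a b c e : Int) (p : List (String × List String)) :
    stepA (PySem.Dict.mk [("Irregular Shape", a), ("Elongated", b), ("Extremely Large", c), ("Extremely Small", e)]) p
    = PySem.Dict.mk [("Irregular Shape", a + (if PySem.Str.isIn "원형도" (joinedR p) then 1 else 0)),
        ("Elongated", b + (if PySem.Str.isIn "종횡비" (joinedR p) || PySem.Str.isIn "길쭉" (joinedR p) then 1 else 0)),
        ("Extremely Large", c + (if PySem.Str.isIn "크고" (joinedR p) || PySem.Str.isIn "large" (PySem.Str.lower (joinedR p)) then 1 else 0)),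
        ("Extremely Small", e + (if PySem.Str.isIn "작고" (joinedR p) || PySem.Str.isIn "small" (PySem.Str.lower (joinedR p)) then 1 else 0))] := by
  unfold stepA joinedR
  split_ifs <;> simp_all [PySem.Dict.modify, PySem.Dict.insert, PySem.Dict.getD, PySem.Dict.get?, PySem.Dict.contains]

-- A's whole loop, from arbitrary counter values, adds the four categorywise counts.
theorem foldl_stepA (profiles : List (List (String × List String))) :
    ∀ (a b c e : Int),
    profiles.foldl stepA (PySem.Dict.mk [("Irregular Shape", a), ("Elongated", b), ("Extremely Large", c), ("Extremely Small", e)])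
    = PySem.Dict.mk [("Irregular Shape", a + (profiles.countP (fun p => PySem.Str.isIn "원형도" (joinedR p)) : Int)),
        ("Elongated", b + (profiles.countP (fun p => PySem.Str.isIn "종횡비" (joinedR p) || PySem.Str.isIn "길쭉" (joinedR p)) : Int)),
        ("Extremely Large", c + (profiles.countP (fun p => PySem.Str.isIn "크고" (joinedR p) || PySem.Str.isIn "large" (PySem.Str.lower (joinedR p))) : Int)),
        ("Extremely Small", e + (profiles.countP (fun p => PySem.Str.isIn "작고" (joinedR p) || PySem.Str.isIn "small" (PySem.Str.lower (joinedR p))) : Int))] := by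
  induction profiles with
  | nil => intro a b c e; simp
  | cons p ps ih =>
    intro a b c e
    rw [List.foldl_cons, stepA_mk, ih]
    simp only [List.countP_cons, PySem.Dict.mk.injEq, List.cons.injEq, Prod.mk.injEq]
    and_intros <;> first
      | trivial
      | (split_ifs <;> push_cast <;> ring)

-- ===== VERDICT (by name: the statement is the Claim_ definition above) =====
theorem categorize_abnormalities_py_spec : Claim_equal_categorize_abnormalities_py := by
  intro profiles _ _
  unfold Spec_categorize_abnormalities_py categorize_abnormalities_py categorize_abnormalities_py_alt
  have h0 : PySem.Dict.ofList [("Irregular Shape", (0:Int)), ("Elongated", 0), ("Extremely Large", 0), ("Extremely Small", 0)]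
      = PySem.Dict.mk [("Irregular Shape", 0), ("Elongated", 0), ("Extremely Large", 0), ("Extremely Small", 0)] := by decide
  simp only [h0, foldl_stepA, zero_add]
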